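-- pv_equiv track=rewrite | github.com/gdaythcli/InfiniTuner | search/summary_agent.py | split_string_by_length
-- ===== SOURCE A (Python) =====
-- def split_string_by_length(s, max_length):
--     """Split a string into chunks with a maximum length, keeping whole lines when possible.
--
--     If a single line exceeds ``max_length``, the line is further sliced into sub-strings.
--
--     Args:
--         s (str): Input string that may contain newline characters.
--         max_length (int): Maximum length of each chunk; must be greater than 0.
--
--     Returns:
--         List[str]: List of chunks whose lengths do not exceed ``max_length``.
--     """
--     if max_length <= 0:
--         raise ValueError("max_length must be greater than 0")
--
--     result = []
--     current_chunk = ""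
--
--     # Use splitlines(keepends=True) to preserve newline characters within each line
--     for line in s.splitlines(keepends=True):
--         # Split the line further if it individually exceeds max_length
--         if len(line) > max_length:
--             # Flush the current chunk if it already has content
--             if current_chunk:
--                 result.append(current_chunk)
--                 current_chunk = ""
--             # Emit slices of the long line, each no longer than max_length
--             for i in range(0, len(line), max_length):
--                 piece = line[i:i+max_length]
--                 result.append(piece)
--         else:
--             # Check whether appending the line keeps the chunk within max_length
--             if len(current_chunk) + len(line) <= max_length:
--                 current_chunk += line
--             else:
--                 # Otherwise flush the chunk and start a new one with the current line
--                 if current_chunk: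
--                     result.append(current_chunk)
--                 current_chunk = line
--
--     if current_chunk:
--         result.append(current_chunk)
--
--     return result
-- ===== SOURCE B (Python) =====
-- def split_string_by_length(s, max_length):
--     """Two-pass rewrite: first tag line segments (standalone slices of oversized
--     lines vs combinable short lines), then pack tagged segments into chunks."""
--     if max_length <= 0:
--         raise ValueError("max_length must be greater than 0")
--
--     segments = []
--     for line in s.splitlines(keepends=True):
--         if len(line) > max_length:
--             segments.extend((line[i:i + max_length], True)
--                             for i in range(0, len(line), max_length))
--         else:
--             segments.append((line, False))
--
--     result = []
--     current = ""
--     for piece, standalone in segments: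
--         if standalone:
--             if current:
--                 result.append(current)
--                 current = ""
--             result.append(piece)
--         elif len(current) + len(piece) <= max_length:
--             current += piece
--         else:
--             if current:
--                 result.append(current)
--             current = piece
--     if current:
--         result.append(current)
--     return result
-- ===== Notes on version B (the rewrite author's own statement) =====
-- stated objective: alternative
-- what changed: B separates A's single interleaved loop into two passes: it first builds a flat list of tagged segments (slices of oversized lines marked standalone, short lines marked combinable), then packs that segment list into chunks keyed off the standalone flag.
import Mathlib
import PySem

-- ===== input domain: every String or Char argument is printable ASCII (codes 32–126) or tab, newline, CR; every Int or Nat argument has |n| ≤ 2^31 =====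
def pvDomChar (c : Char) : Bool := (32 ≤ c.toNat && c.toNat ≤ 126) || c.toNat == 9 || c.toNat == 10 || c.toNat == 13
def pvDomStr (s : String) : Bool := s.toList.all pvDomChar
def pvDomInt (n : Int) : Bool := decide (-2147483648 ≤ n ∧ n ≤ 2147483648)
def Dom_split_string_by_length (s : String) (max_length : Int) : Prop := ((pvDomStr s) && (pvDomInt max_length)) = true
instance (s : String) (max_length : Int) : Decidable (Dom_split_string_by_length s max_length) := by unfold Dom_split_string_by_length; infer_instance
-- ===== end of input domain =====

-- B changes the decomposition only (two passes over tagged segments instead of one interleaved loop); the proofs show the return values agree whenever max_length > 0.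

-- shared helper: s.splitlines(keepends=True), hand-ported (PySem.Str.splitlines drops the ends).
-- Exact on the Dom charset, where the only line boundaries Python recognises are '\n', '\r\n' and '\r'.
def pvSplitlinesKeep : List Char → List (List Char)
  | [] => []
  | '\r' :: '\n' :: rest => ['\r', '\n'] :: pvSplitlinesKeep rest
  | '\r' :: rest => ['\r'] :: pvSplitlinesKeep rest
  | '\n' :: rest => ['\n'] :: pvSplitlinesKeep rest
  | c :: rest =>
      match pvSplitlinesKeep rest with
      | [] => [[c]]
      | l :: ls => (c :: l) :: ls

-- ===== PORT A =====
-- loop body of A: state (result, current_chunk), one line per step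
def pvAStep (m : Int) (st : List (List Char) × List Char) (line : List Char) :
    List (List Char) × List Char :=
  if (line.length : Int) > m then
    let res1 := if st.2 ≠ [] then st.1 ++ [st.2] else st.1
    ((PySem.List.pyRange 0 (line.length : Int) m).foldl
        (fun r i => r ++ [PySem.List.slice line (some i) (some (i + m))]) res1, [])
  else
    if (st.2.length : Int) + (line.length : Int) ≤ m then (st.1, st.2 ++ line)
    else ((if st.2 ≠ [] then st.1 ++ [st.2] else st.1), line)

def split_string_by_length (s : String) (max_length : Int) : List String :=
  if max_length ≤ 0 then []   -- Python raises ValueError here; excluded by Pre_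
  else
    let st := (pvSplitlinesKeep s.toList).foldl (pvAStep max_length) ([], [])
    (if st.2 ≠ [] then st.1 ++ [st.2] else st.1).map String.ofList

-- ===== PORT B =====
-- first pass of B: the tagged segment list (piece, standalone?)
def pvSegments (m : Int) (lines : List (List Char)) : List (List Char × Bool) :=
  lines.flatMap (fun line =>
    if (line.length : Int) > m then
      (PySem.List.pyRange 0 (line.length : Int) m).map
        (fun i => (PySem.List.slice line (some i) (some (i + m)), true))
    else [(line, false)])

-- second pass of B: pack one tagged segment into (result, current)
def pvBStep (m : Int) (st : List (List Char) × List Char) (seg : List Char × Bool) :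
    List (List Char) × List Char :=
  if seg.2 then
    ((if st.2 ≠ [] then st.1 ++ [st.2] else st.1) ++ [seg.1], [])
  else if (st.2.length : Int) + (seg.1.length : Int) ≤ m then (st.1, st.2 ++ seg.1)
  else ((if st.2 ≠ [] then st.1 ++ [st.2] else st.1), seg.1)

def split_string_by_length_alt (s : String) (max_length : Int) : List String :=
  if max_length ≤ 0 then []   -- Python raises ValueError here; excluded by Pre_
  else
    let st := (pvSegments max_length (pvSplitlinesKeep s.toList)).foldl
      (pvBStep max_length) ([], [])
    (if st.2 ≠ [] then st.1 ++ [st.2] else st.1).map String.ofList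

-- ===== PRECONDITION & SPEC =====
-- Python raises ValueError exactly when max_length <= 0 (both A and B); nothing else is excluded.
def Pre_split_string_by_length (s : String) (max_length : Int) : Prop := 0 < max_length
instance (s : String) (max_length : Int) : Decidable (Pre_split_string_by_length s max_length) := by
  unfold Pre_split_string_by_length; infer_instance

def pvWitness_split_string_by_length : String × Int := ("ab\ncdef\r\ng", 3)

def Spec_split_string_by_length (s : String) (max_length : Int) (out : List String) : Prop :=
  out = split_string_by_length_alt s max_length
instance (s : String) (max_length : Int) (out : List String) :
    Decidable (Spec_split_string_by_length s max_length out) := by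
  unfold Spec_split_string_by_length; infer_instance

-- ===== CLAIM (what is proved, stated in full; the proofs are below) =====
def Claim_equal_split_string_by_length : Prop :=
  ∀ (s : String) (max_length : Int), Dom_split_string_by_length s max_length →
    Pre_split_string_by_length s max_length →
    Spec_split_string_by_length s max_length (split_string_by_length s max_length)

-- ===== LEMMAS AND PROOFS =====

-- packing a nonempty run of standalone pieces = flush current, then append the pieces
theorem pvPack_standalone (m : Int) (pieces : List (List Char)) (res : List (List Char))
    (cur : List Char) (h : pieces ≠ []) :
    (pieces.map (fun p => (p, true))).foldl (pvBStep m) (res, cur) =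
      ((if cur ≠ [] then res ++ [cur] else res) ++ pieces, []) := by
  induction pieces generalizing res cur with
  | nil => exact absurd rfl h
  | cons p ps ih =>
    simp only [List.map_cons, List.foldl_cons]
    by_cases hps : ps = []
    · subst hps; simp [pvBStep]
    · rw [show pvBStep m (res, cur) (p, true) =
          ((if cur ≠ [] then res ++ [cur] else res) ++ [p], []) from by simp [pvBStep]]
      rw [ih _ _ hps]
      simp

-- the pyRange over a long line is nonempty (needed so the first slice flushes the chunk)
theorem pvRange_ne_nil (n m : Int) (hn : 0 < n) (hm : 0 < m) :
    PySem.List.pyRange 0 n m ≠ [] := by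
  intro hcontra
  have : (0 : Int) ∈ PySem.List.pyRange 0 n m := by
    rw [PySem.List.mem_pyRange_iff_of_pos hm]
    refine ⟨le_refl _, hn, ?_⟩
    simp
  rw [hcontra] at this
  exact absurd this (List.not_mem_nil)

-- one loop of A over the lines = B's pack over the tagged segments of those lines
theorem pvLoop_eq (m : Int) (hm : 0 < m) (lines : List (List Char))
    (st : List (List Char) × List Char) :
    lines.foldl (pvAStep m) st = (pvSegments m lines).foldl (pvBStep m) st := by
  induction lines generalizing st with
  | nil => simp [pvSegments]
  | cons line rest ih =>
    simp only [List.foldl_cons, pvSegments, List.flatMap_cons, List.foldl_append]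
    rw [← pvSegments]
    by_cases hlong : (line.length : Int) > m
    · simp only [hlong, if_pos]
      have hne : (PySem.List.pyRange 0 (line.length : Int) m).map
          (fun i => PySem.List.slice line (some i) (some (i + m))) ≠ [] := by
        simp only [ne_eq, List.map_eq_nil_iff]
        exact pvRange_ne_nil _ m (by omega) hm
      have hA : pvAStep m st line =
          ((if st.2 ≠ [] then st.1 ++ [st.2] else st.1) ++
            (PySem.List.pyRange 0 (line.length : Int) m).map
              (fun i => PySem.List.slice line (some i) (some (i + m))), []) := by
        simp only [pvAStep, if_pos hlong]
        rw [PySem.List.foldl_append_singleton_eq_map]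
      have hB :
          ((PySem.List.pyRange 0 (line.length : Int) m).map
              (fun i => (PySem.List.slice line (some i) (some (i + m)), true))).foldl
            (pvBStep m) st =
          ((if st.2 ≠ [] then st.1 ++ [st.2] else st.1) ++
            (PySem.List.pyRange 0 (line.length : Int) m).map
              (fun i => PySem.List.slice line (some i) (some (i + m))), []) := by
        have := pvPack_standalone m
          ((PySem.List.pyRange 0 (line.length : Int) m).map
            (fun i => PySem.List.slice line (some i) (some (i + m)))) st.1 st.2 hne
        rw [List.map_map] at this
        exact this
      rw [hA, ih, hB]
    · simp only [hlong, if_false]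
      have : pvAStep m st line = pvBStep m st (line, false) := by
        simp [pvAStep, pvBStep, hlong]
      rw [this, ih]
      simp

-- ===== VERDICT (by name: the statement is the Claim_ definition above) =====
theorem split_string_by_length_spec : Claim_equal_split_string_by_length := by
  intro s m _ hpre
  unfold Spec_split_string_by_length split_string_by_length split_string_by_length_alt
  have hm : ¬ m ≤ 0 := by exact not_le.mpr hpre
  simp only [hm, if_false]
  rw [pvLoop_eq m hpre]
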